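-- pv_equiv track=rewrite | github.com/Ahmad-Fahad/Python | My_Algorithm_Tactics/Destroy_The_Same.py | Destroy
-- ===== SOURCE A (Python) =====
-- def Destroy(lst):
-- 	for i in range(len(lst)-1):
-- 		j = i+1
-- 		while j<len(lst):
-- 			if lst[i] != lst[j]:
-- 				break
-- 			else:
-- 				lst[j] = 0
-- 			j = j+1
-- 	return lst
-- ===== SOURCE B (Python) =====
-- # Single pass over the original neighbour pairs (A is O(n^2) on duplicate runs).
-- # A mutates lst in place and returns it; B builds a fresh list (return value is identical).
-- def Destroy(lst):
--     if not lst: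
--         return []
--     out = [lst[0]]
--     for prev, cur in zip(lst, lst[1:]):
--         out.append(0 if cur == prev else cur)
--     return out
-- ===== Notes on version B (the rewrite author's own statement) =====
-- stated objective: faster
-- what changed: Replaced A's nested index loops (each position rescanning and re-zeroing the following equal run) by a single pass over the original neighbour pairs that emits 0 whenever an element equals its predecessor; B builds a fresh list instead of mutating in place (same return value).
import Mathlib
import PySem

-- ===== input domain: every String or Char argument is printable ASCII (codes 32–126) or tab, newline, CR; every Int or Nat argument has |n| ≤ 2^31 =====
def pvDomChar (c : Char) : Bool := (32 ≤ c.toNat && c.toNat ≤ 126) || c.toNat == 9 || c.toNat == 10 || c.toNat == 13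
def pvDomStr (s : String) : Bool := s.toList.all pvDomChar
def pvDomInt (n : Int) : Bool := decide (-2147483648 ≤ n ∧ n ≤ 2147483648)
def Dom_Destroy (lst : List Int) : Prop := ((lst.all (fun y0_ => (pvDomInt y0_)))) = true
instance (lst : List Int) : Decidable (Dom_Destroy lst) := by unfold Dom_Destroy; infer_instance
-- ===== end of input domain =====

-- B replaces A's quadratic nested index loops by one pass over the original neighbour
-- pairs (objective: faster). A mutates lst in place and returns it; B builds a fresh
-- list — the equivalence proved here is about the RETURN value only.

-- ===== PORT A =====
-- inner 'while j < len(lst): if lst[i] != lst[j]: break else: lst[j] = 0; j = j+1'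
def destroyInner (lst : List Int) (i j : Nat) : List Int :=
  if _h : j < lst.length then
    if lst.getD i 0 ≠ lst.getD j 0 then lst
    else destroyInner (lst.set j 0) i (j + 1)
  else lst
termination_by lst.length - j
decreasing_by simp only [List.length_set]; omega

-- 'for i in range(len(lst)-1): j = i+1; <inner>' (len(lst) never changes)
def Destroy (lst : List Int) : List Int :=
  (List.range (lst.length - 1)).foldl (fun acc i => destroyInner acc i (i + 1)) lst

-- ===== PORT B =====
def Destroy_alt (lst : List Int) : List Int :=
  match lst with
  | [] => []
  | x :: xs =>
    (List.zip (x :: xs) xs).foldl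
      (fun out pc => out ++ [if pc.2 == pc.1 then 0 else pc.2]) [x]

-- ===== PRECONDITION & SPEC =====
def Spec_Destroy (lst : List Int) (out : List Int) : Prop := out = Destroy_alt lst
instance (lst : List Int) (out : List Int) : Decidable (Spec_Destroy lst out) := by unfold Spec_Destroy; infer_instance

-- ===== CLAIM (what is proved, stated in full; the proofs are below) =====
def Claim_equal_Destroy : Prop := ∀ (lst : List Int), Dom_Destroy lst → Spec_Destroy lst (Destroy lst)

-- ===== LEMMAS AND PROOFS =====

-- zero out the leading run of elements equal to v
def zeroRun (v : Int) : List Int → List Int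
  | [] => []
  | y :: ys => if y = v then 0 :: zeroRun v ys else y :: ys

-- the neighbour-pair rule
def nb (prev cur : Int) : Int := if cur = prev then 0 else cur

-- the common specification
def specF : List Int → List Int
  | [] => []
  | x :: xs => x :: List.zipWith nb (x :: xs) xs

theorem zeroRun_length (v : Int) (l : List Int) : (zeroRun v l).length = l.length := by
  induction l with
  | nil => rfl
  | cons y ys ih => simp only [zeroRun]; split <;> simp [ih]

theorem destroyInner_eq (lst : List Int) (i j : Nat) (hij : i < j) :
    destroyInner lst i j = lst.take j ++ zeroRun (lst.getD i 0) (lst.drop j) := by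
  rw [destroyInner]
  split_ifs with h hne
  · rw [List.drop_eq_getElem_cons h, zeroRun,
        if_neg (by rw [List.getD_eq_getElem _ _ h] at hne; exact fun he => hne he.symm),
        ← List.drop_eq_getElem_cons h, List.take_append_drop]
  · rw [not_ne_iff] at hne
    rw [destroyInner_eq (lst.set j 0) i (j + 1) (Nat.lt_succ_of_lt hij)]
    have hil : i < lst.length := lt_trans hij h
    have hgi : (lst.set j 0).getD i 0 = lst.getD i 0 := by
      rw [List.getD_eq_getElem _ _ (by simpa using hil), List.getD_eq_getElem _ _ hil,
          List.getElem_set, if_neg (Nat.ne_of_gt hij)]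
    have hdropset : (lst.set j 0).drop (j + 1) = lst.drop (j + 1) := by
      rw [List.drop_set, if_pos (Nat.lt_succ_self j)]
    have htakeset : (lst.set j 0).take (j + 1) = lst.take j ++ [0] := by
      rw [List.take_set, List.take_add_one, List.getElem?_eq_getElem h, Option.toList_some,
          List.set_append, if_neg (by rw [List.length_take]; omega), List.length_take,
          Nat.min_eq_left (Nat.le_of_lt h), Nat.sub_self]
      rfl
    rw [hgi, hdropset, htakeset, List.drop_eq_getElem_cons h, zeroRun,
        if_pos (by rw [List.getD_eq_getElem _ _ h] at hne; exact hne.symm)]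
    simp
  · rw [List.drop_eq_nil_of_le (Nat.le_of_not_lt h), List.take_of_length_le (Nat.le_of_not_lt h)]
    simp [zeroRun]
termination_by lst.length - j
decreasing_by simp only [List.length_set]; omega

-- one outer pass, as a pure function of (acc, i)
def passF (acc : List Int) (i : Nat) : List Int :=
  acc.take (i + 1) ++ zeroRun (acc.getD i 0) (acc.drop (i + 1))

theorem passF_cons (x : Int) (t : List Int) (i : Nat) :
    passF (x :: t) (i + 1) = x :: passF t i := by
  simp [passF]

theorem foldl_passF_map_succ (l : List Nat) (x : Int) (t : List Int) :
    l.foldl (fun acc i => passF acc (i + 1)) (x :: t)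
      = x :: l.foldl passF t := by
  induction l generalizing t with
  | nil => rfl
  | cons a as ih => simp only [List.foldl_cons, passF_cons]; exact ih _

theorem passF_zero (x : Int) (xs : List Int) :
    passF (x :: xs) 0 = x :: zeroRun x xs := by
  simp [passF]

-- A's whole loop, expressed with passF
def ADef (lst : List Int) : List Int :=
  (List.range (lst.length - 1)).foldl passF lst

theorem destroy_eq_ADef (lst : List Int) : Destroy lst = ADef lst := by
  unfold Destroy ADef
  congr 1
  funext acc i
  exact destroyInner_eq acc i (i + 1) (Nat.lt_succ_self i)

theorem zipWith_nb_zeroRun (x : Int) (ys : List Int) :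
    List.zipWith nb (0 :: zeroRun x ys) (zeroRun x ys) = List.zipWith nb (x :: ys) ys := by
  induction ys with
  | nil => rfl
  | cons w ws ih =>
    by_cases hw : w = x
    · subst hw
      rw [show zeroRun w (w :: ws) = 0 :: zeroRun w ws from by simp [zeroRun]]
      simp only [List.zipWith_cons_cons, ih]
      simp [nb]
    · rw [show zeroRun x (w :: ws) = w :: ws from by simp [zeroRun, hw]]
      simp only [List.zipWith_cons_cons]
      congr 1
      by_cases h0 : w = 0
      · subst h0; simp [nb, hw]
      · simp [nb, h0, hw]

theorem specF_zeroRun (x : Int) (xs : List Int) :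
    specF (zeroRun x xs) = List.zipWith nb (x :: xs) xs := by
  cases xs with
  | nil => rfl
  | cons y ys =>
    by_cases hy : y = x
    · subst hy
      rw [show zeroRun y (y :: ys) = 0 :: zeroRun y ys from by simp [zeroRun]]
      rw [specF, zipWith_nb_zeroRun]
      simp [nb]
    · rw [show zeroRun x (y :: ys) = y :: ys from by simp [zeroRun, hy]]
      rw [specF]
      simp [nb, hy]

theorem ADef_cons (x : Int) (xs : List Int) :
    ADef (x :: xs) = x :: ADef (zeroRun x xs) := by
  unfold ADef
  cases xs with
  | nil => rfl
  | cons y ys =>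
    have hlen : (x :: y :: ys).length - 1 = ((y :: ys).length - 1) + 1 := by
      simp
    rw [hlen, List.range_succ_eq_map, List.foldl_cons, passF_zero]
    have : ∀ (l : List Nat) (t : List Int),
        (l.map Nat.succ).foldl passF (x :: t) = l.foldl (fun acc i => passF acc (i + 1)) (x :: t) := by
      intro l
      induction l with
      | nil => intro t; rfl
      | cons a as ih => intro t; simp only [List.map_cons, List.foldl_cons, Nat.succ_eq_add_one, passF_cons]
                        rw [ih, ← passF_cons]
    rw [this, foldl_passF_map_succ]
    congr 2
    rw [zeroRun_length]

theorem ADef_eq_specF (lst : List Int) : ADef lst = specF lst := by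
  cases hl : lst with
  | nil => rfl
  | cons x xs =>
    have hlen : (zeroRun x xs).length = xs.length := zeroRun_length x xs
    rw [ADef_cons, ADef_eq_specF (zeroRun x xs), specF_zeroRun, specF]
termination_by lst.length
decreasing_by subst hl; simp [zeroRun_length]

theorem foldl_append_map {α β : Type} (g : α → β) (l : List α) (init : List β) :
    l.foldl (fun out a => out ++ [g a]) init = init ++ l.map g := by
  induction l generalizing init with
  | nil => simp
  | cons a as ih => simp [ih]

theorem map_nb_zip (l l' : List Int) :
    (List.zip l l').map (fun pc => if pc.2 == pc.1 then (0 : Int) else pc.2)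
      = List.zipWith nb l l' := by
  induction l generalizing l' with
  | nil => simp
  | cons a as ih =>
    cases l' with
    | nil => simp
    | cons b bs =>
      rw [List.zip_cons_cons, List.map_cons, ih, List.zipWith_cons_cons]
      congr 1
      simp [nb, beq_iff_eq]

theorem destroy_alt_eq_specF (lst : List Int) : Destroy_alt lst = specF lst := by
  cases lst with
  | nil => rfl
  | cons x xs =>
    show (List.zip (x :: xs) xs).foldl
        (fun out pc => out ++ [if pc.2 == pc.1 then 0 else pc.2]) [x]
      = x :: List.zipWith nb (x :: xs) xs
    rw [foldl_append_map (fun pc : Int × Int => if pc.2 == pc.1 then (0 : Int) else pc.2),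
        map_nb_zip]
    rfl

-- ===== VERDICT (by name: the statement is the Claim_ definition above) =====
theorem Destroy_spec : Claim_equal_Destroy := by
  intro lst _
  unfold Spec_Destroy
  rw [destroy_eq_ADef, ADef_eq_specF, destroy_alt_eq_specF]
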